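-- pv_equiv track=rewrite | github.com/HnuAiSimOpt/Test | 第二次作业/B230200151陈崇学/TrajectoryPredict/Processing/8_Model/model.py | create_training_pairs
-- ===== SOURCE A (Python) =====
-- def create_training_pairs(trajectories):
--     training_pairs = []
--
--     for traj in trajectories:
--         n = len(traj)
--         if n < 3:
--             continue
--
--         def add_pairs(start_idx, end_idx):
--             if end_idx - start_idx < 2:
--                 return
--
--             start_point = traj[start_idx]
--             end_point = traj[end_idx]
--             mid_idx = (start_idx + end_idx) // 2
--             middle_point = traj[mid_idx]
--
--             training_pairs.append((start_point, end_point, middle_point))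
--
--             # 递归生成左半部分和右半部分的训练对
--             add_pairs(start_idx, mid_idx)
--             add_pairs(mid_idx, end_idx)
--
--         add_pairs(0, n - 1)
--
--     return training_pairs
-- ===== SOURCE B (Python) =====
-- def create_training_pairs(trajectories):
--     training_pairs = []
--     for traj in trajectories:
--         n = len(traj)
--         if n < 3:
--             continue
--         stack = [(0, n - 1)]
--         while stack:
--             start, end = stack.pop()
--             if end - start < 2:
--                 continue
--             mid = (start + end) // 2
--             training_pairs.append((traj[start], traj[end], traj[mid]))
--             # push right then left so the left segment is processed first (pre-order)
--             stack.append((mid, end))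
--             stack.append((start, mid))
--     return training_pairs
-- ===== Notes on version B (the rewrite author's own statement) =====
-- stated objective: alternative
-- what changed: Replaced the nested recursive add_pairs closure with an explicit stack-based worklist loop that emits the same pre-order sequence of (start, end, mid) triples.
import Mathlib
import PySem

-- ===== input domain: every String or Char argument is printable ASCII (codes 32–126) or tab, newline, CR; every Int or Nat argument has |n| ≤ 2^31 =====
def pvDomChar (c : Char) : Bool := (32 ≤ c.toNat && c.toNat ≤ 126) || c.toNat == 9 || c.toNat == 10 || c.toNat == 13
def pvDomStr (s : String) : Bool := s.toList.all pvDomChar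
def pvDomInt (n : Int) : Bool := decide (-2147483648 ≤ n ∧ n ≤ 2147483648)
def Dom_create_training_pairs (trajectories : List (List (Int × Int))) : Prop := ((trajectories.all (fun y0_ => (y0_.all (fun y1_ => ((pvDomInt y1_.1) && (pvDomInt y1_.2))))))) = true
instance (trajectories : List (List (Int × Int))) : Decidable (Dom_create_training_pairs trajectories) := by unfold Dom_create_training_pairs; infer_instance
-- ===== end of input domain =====

-- B replaces A's nested recursive add_pairs with an explicit stack-based worklist; same pre-order output (objective: alternative).


-- ===== PORT A =====
-- add_pairs: indices stay Nat (all index arithmetic in A is nonnegative, so Nat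
-- arithmetic, including (start+end)/2, agrees with Python's //); traj[i] is always
-- in range on A's calls, so getD's default is never used; the fuel argument is only
-- a totality guard (fuel = segment width is always sufficient, proved below); the
-- shared training_pairs list appended to in pre-order becomes the returned concatenation.
def addPairsA (traj : List (Int × Int)) (fuel : Nat) (start_idx end_idx : Nat) :
    List ((Int × Int) × (Int × Int) × (Int × Int)) :=
  match fuel with
  | 0 => []
  | fuel + 1 =>
    if end_idx - start_idx < 2 then []
    else
      let start_point := traj.getD start_idx (0, 0)
      let end_point := traj.getD end_idx (0, 0)
      let mid_idx := (start_idx + end_idx) / 2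
      let middle_point := traj.getD mid_idx (0, 0)
      (start_point, end_point, middle_point) ::
        (addPairsA traj fuel start_idx mid_idx ++ addPairsA traj fuel mid_idx end_idx)

def create_training_pairs (trajectories : List (List (Int × Int))) : List ((Int × Int) × (Int × Int) × (Int × Int)) :=
  trajectories.foldl
    (fun training_pairs traj =>
      if traj.length < 3 then training_pairs
      else training_pairs ++ addPairsA traj traj.length 0 (traj.length - 1))
    []

-- ===== PORT B =====
-- stack-based worklist; head of the list is the top of the stack; the fuel argument is
-- only a totality guard (3 ^ traj.length bounds the number of loop iterations, proved below)
def runStack (traj : List (Int × Int)) (fuel : Nat) (stack : List (Nat × Nat))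
    (training_pairs : List ((Int × Int) × (Int × Int) × (Int × Int))) :
    List ((Int × Int) × (Int × Int) × (Int × Int)) :=
  match fuel with
  | 0 => training_pairs
  | fuel + 1 =>
    match stack with
    | [] => training_pairs
    | (start, end_) :: rest =>
      if end_ - start < 2 then runStack traj fuel rest training_pairs
      else
        let mid := (start + end_) / 2
        runStack traj fuel ((start, mid) :: (mid, end_) :: rest)
          (training_pairs ++ [(traj.getD start (0,0), traj.getD end_ (0,0), traj.getD mid (0,0))])

def create_training_pairs_alt (trajectories : List (List (Int × Int))) : List ((Int × Int) × (Int × Int) × (Int × Int)) :=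
  trajectories.foldl
    (fun training_pairs traj =>
      if traj.length < 3 then training_pairs
      else runStack traj (3 ^ traj.length) [(0, traj.length - 1)] training_pairs)
    []

-- ===== PRECONDITION & SPEC =====
def Spec_create_training_pairs (trajectories : List (List (Int × Int))) (out : List ((Int × Int) × (Int × Int) × (Int × Int))) : Prop := out = create_training_pairs_alt trajectories
instance (trajectories : List (List (Int × Int))) (out : List ((Int × Int) × (Int × Int) × (Int × Int))) : Decidable (Spec_create_training_pairs trajectories out) := by unfold Spec_create_training_pairs; infer_instance

-- ===== CLAIM (what is proved, stated in full; the proofs are below) =====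
def Claim_equal_create_training_pairs : Prop := ∀ (trajectories : List (List (Int × Int))), Dom_create_training_pairs trajectories → Spec_create_training_pairs trajectories (create_training_pairs trajectories)

-- ===== LEMMAS AND PROOFS =====
-- the fuel of addPairsA is irrelevant once it is at least the segment width
theorem addPairsA_small (traj : List (Int × Int)) (f s e : Nat) (h : e - s < 2) :
    addPairsA traj f s e = [] := by
  cases f with
  | zero => rfl
  | succ f => simp [addPairsA, h]

theorem addPairsA_fuel (traj : List (Int × Int)) :
    ∀ (f1 f2 s e : Nat), e - s ≤ f1 → e - s ≤ f2 →
      addPairsA traj f1 s e = addPairsA traj f2 s e := by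
  intro f1
  induction f1 with
  | zero =>
    intro f2 s e h1 _
    rw [addPairsA_small traj 0 s e (by omega), addPairsA_small traj f2 s e (by omega)]
  | succ f ih =>
    intro f2 s e h1 h2
    by_cases hw : e - s < 2
    · rw [addPairsA_small traj _ s e hw, addPairsA_small traj f2 s e hw]
    · cases f2 with
      | zero => omega
      | succ g =>
        simp only [addPairsA, if_neg hw]
        rw [ih g s ((s + e) / 2) (by omega) (by omega),
            ih g ((s + e) / 2) e (by omega) (by omega)]

-- the worklist loop, run with enough fuel, emits exactly the recursion's pre-order output
theorem stackMeasure_bound (traj : List (Int × Int)) :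
    ∀ (fuel : Nat) (stack : List (Nat × Nat))
      (acc : List ((Int × Int) × (Int × Int) × (Int × Int))),
      (stack.map (fun p => 3 ^ (p.2 - p.1))).sum < fuel →
      runStack traj fuel stack acc =
        acc ++ (stack.map (fun p => addPairsA traj (p.2 - p.1) p.1 p.2)).flatten := by
  intro fuel
  induction fuel with
  | zero => intro stack acc h; omega
  | succ f ih =>
    intro stack acc h
    match stack with
    | [] => simp [runStack]
    | (s, e) :: rest =>
      simp only [List.map_cons, List.sum_cons] at h
      have hpos : 0 < 3 ^ (e - s) := Nat.pow_pos (by norm_num)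
      by_cases hw : e - s < 2
      · rw [runStack, if_pos hw, ih rest acc (by omega)]
        simp [addPairsA_small traj _ s e hw]
      · have hsplit : 3 ^ ((s + e) / 2 - s) + 3 ^ (e - (s + e) / 2) < 3 ^ (e - s) := by
          have h3 : 3 ^ ((s + e) / 2 - s) ≤ 3 ^ (e - s - 1) :=
            Nat.pow_le_pow_right (by norm_num) (by omega)
          have h4 : 3 ^ (e - (s + e) / 2) ≤ 3 ^ (e - s - 1) :=
            Nat.pow_le_pow_right (by norm_num) (by omega)
          have h5 : 3 ^ (e - s - 1) * 3 = 3 ^ (e - s) := by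
            rw [← pow_succ]; congr 1; omega
          have h6 : 0 < 3 ^ (e - s - 1) := Nat.pow_pos (by norm_num)
          omega
        rw [runStack, if_neg hw,
            ih _ _ (by simp only [List.map_cons, List.sum_cons]; omega)]
        have hz : addPairsA traj (e - s) s e =
            (traj.getD s (0,0), traj.getD e (0,0), traj.getD ((s + e) / 2) (0,0)) ::
              (addPairsA traj ((s + e) / 2 - s) s ((s + e) / 2) ++
               addPairsA traj (e - (s + e) / 2) ((s + e) / 2) e) := by
          have hws : e - s = (e - s - 1) + 1 := by omega
          have e1 := addPairsA_fuel traj (e - s - 1) ((s + e) / 2 - s) s ((s + e) / 2)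
            (by omega) (by omega)
          have e2 := addPairsA_fuel traj (e - s - 1) (e - (s + e) / 2) ((s + e) / 2) e
            (by omega) (by omega)
          rw [hws, addPairsA, if_neg hw]
          simp [e1, e2]
        simp [hz]

theorem per_traj_eq (traj : List (Int × Int))
    (acc : List ((Int × Int) × (Int × Int) × (Int × Int))) (h3 : ¬ traj.length < 3) :
    runStack traj (3 ^ traj.length) [(0, traj.length - 1)] acc =
      acc ++ addPairsA traj traj.length 0 (traj.length - 1) := by
  rw [stackMeasure_bound traj _ _ acc
      (by
        simp only [List.map_cons, List.map_nil, List.sum_cons, List.sum_nil, Nat.add_zero]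
        exact Nat.pow_lt_pow_right (by norm_num) (by omega))]
  simp only [List.map_cons, List.map_nil, List.flatten_cons, List.flatten_nil,
    List.append_nil, Nat.sub_zero]
  rw [addPairsA_fuel traj (traj.length - 1) traj.length 0 (traj.length - 1)
      (by omega) (by omega)]

theorem foldl_eq (trajectories : List (List (Int × Int)))
    (acc : List ((Int × Int) × (Int × Int) × (Int × Int))) :
    trajectories.foldl
      (fun training_pairs traj =>
        if traj.length < 3 then training_pairs
        else training_pairs ++ addPairsA traj traj.length 0 (traj.length - 1)) acc =
    trajectories.foldl
      (fun training_pairs traj =>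
        if traj.length < 3 then training_pairs
        else runStack traj (3 ^ traj.length) [(0, traj.length - 1)] training_pairs) acc := by
  induction trajectories generalizing acc with
  | nil => rfl
  | cons traj rest ih =>
    simp only [List.foldl_cons]
    by_cases h : traj.length < 3
    · simp [h, ih]
    · rw [if_neg h, if_neg h, per_traj_eq traj acc h, ih]

-- ===== VERDICT (by name: the statement is the Claim_ definition above) =====
theorem create_training_pairs_spec : Claim_equal_create_training_pairs := by
  intro trajectories _
  unfold Spec_create_training_pairs create_training_pairs create_training_pairs_alt
  exact foldl_eq trajectories []
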